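-- pv_equiv track=rewrite | github.com/surt91/randomWalk | py/exactMeanV.py | candidateCombinations
-- ===== SOURCE A (Python) =====
-- from itertools import product
--
-- def candidateCombinations(T, d):
--     if d == 2:
--         for i in range(1, T + 1):
--             for j in range(1, T + 1 - i):
--                 yield (i, j)
--     elif d == 3:
--         for i in range(1, T + 1):
--             for j in range(1, T + 1 - i):
--                 for k in range(1, T + 1 - i - j):
--                     yield (i, j, k)
--     elif d == 4:
--         for i in range(1, T + 1):
--             for j in range(1, T + 1 - i):
--                 for k in range(1, T + 1 - i - j):
--                     for l in range(1, T + 1 - i - j - k):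
--                         yield (i, j, k, l)
--     elif d == 5:
--         for i in range(1, T + 1):
--             for j in range(1, T + 1 - i):
--                 for k in range(1, T + 1 - i - j):
--                     for l in range(1, T + 1 - i - j - k):
--                         for m in range(1, T + 1 - i - j - k - l):
--                             yield (i, j, k, l, m)
--     elif d == 6:
--         for i in range(1, T + 1):
--             for j in range(1, T + 1 - i):
--                 for k in range(1, T + 1 - i - j):
--                     for l in range(1, T + 1 - i - j - k):
--                         for m in range(1, T + 1 - i - j - k - l):
--                             for n in range(1, T + 1 - i - j - k - l - m):
--                                 yield (i, j, k, l, m, n)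
--     else:
--         for c in product(range(1, T + 1), repeat=d):
--             yield c
-- ===== SOURCE B (Python) =====
-- from itertools import product
--
-- def candidateCombinations(T, d):
--     # One recursive generator replaces the five hand-unrolled nested-loop blocks.
--     # Only d in 2..6 gets the bounded-partial-sum constraint, mirroring A's branching.
--     if 2 <= d <= 6:
--         def rec(remaining, depth):
--             if depth == 0:
--                 yield ()
--             else:
--                 for x in range(1, remaining):
--                     for rest in rec(remaining - x, depth - 1):
--                         yield (x,) + rest
--         yield from rec(T + 1, d)
--     else:
--         yield from product(range(1, T + 1), repeat=d)
-- ===== Notes on version B (the rewrite author's own statement) =====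
-- stated objective: simpler
-- what changed: Replaces the five hand-unrolled nested-loop blocks (one per d in 2..6) with a single recursive generator rec(remaining, depth) that threads the remaining sum budget; the else branch keeps itertools.product as in A.
import Mathlib
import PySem

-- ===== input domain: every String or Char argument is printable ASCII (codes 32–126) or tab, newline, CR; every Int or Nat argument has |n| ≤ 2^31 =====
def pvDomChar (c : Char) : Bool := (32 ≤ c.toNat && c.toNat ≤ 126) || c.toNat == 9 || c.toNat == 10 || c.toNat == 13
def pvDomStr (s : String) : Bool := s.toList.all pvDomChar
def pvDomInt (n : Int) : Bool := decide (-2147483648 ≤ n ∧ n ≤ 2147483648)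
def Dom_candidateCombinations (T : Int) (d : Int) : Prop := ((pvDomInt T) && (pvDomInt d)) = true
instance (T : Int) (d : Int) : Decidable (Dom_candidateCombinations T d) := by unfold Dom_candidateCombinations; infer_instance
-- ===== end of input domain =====

-- B replaces A's five hand-unrolled nested-loop blocks by one recursive generator (simpler decomposition, same output order).
-- Both functions are Python generators; the equivalence is about the sequence of yielded tuples, materialised as a list.

-- ===== PORT A =====
-- itertools.product(range(1, T+1), repeat=n): lexicographic, rightmost position varies fastest.
def pvProdRepeat (xs : List Int) : Nat → List (List Int)
  | 0 => [[]]
  | n + 1 => xs.flatMap (fun x => (pvProdRepeat xs n).map (fun c => x :: c))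

def candidateCombinations (T : Int) (d : Int) : List (List Int) :=
  if d = 2 then
    (PySem.List.pyRange 1 (T + 1) 1).flatMap (fun i =>
      (PySem.List.pyRange 1 (T + 1 - i) 1).map (fun j => [i, j]))
  else if d = 3 then
    (PySem.List.pyRange 1 (T + 1) 1).flatMap (fun i =>
      (PySem.List.pyRange 1 (T + 1 - i) 1).flatMap (fun j =>
        (PySem.List.pyRange 1 (T + 1 - i - j) 1).map (fun k => [i, j, k])))
  else if d = 4 then
    (PySem.List.pyRange 1 (T + 1) 1).flatMap (fun i =>
      (PySem.List.pyRange 1 (T + 1 - i) 1).flatMap (fun j =>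
        (PySem.List.pyRange 1 (T + 1 - i - j) 1).flatMap (fun k =>
          (PySem.List.pyRange 1 (T + 1 - i - j - k) 1).map (fun l => [i, j, k, l]))))
  else if d = 5 then
    (PySem.List.pyRange 1 (T + 1) 1).flatMap (fun i =>
      (PySem.List.pyRange 1 (T + 1 - i) 1).flatMap (fun j =>
        (PySem.List.pyRange 1 (T + 1 - i - j) 1).flatMap (fun k =>
          (PySem.List.pyRange 1 (T + 1 - i - j - k) 1).flatMap (fun l =>
            (PySem.List.pyRange 1 (T + 1 - i - j - k - l) 1).map (fun m => [i, j, k, l, m])))))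
  else if d = 6 then
    (PySem.List.pyRange 1 (T + 1) 1).flatMap (fun i =>
      (PySem.List.pyRange 1 (T + 1 - i) 1).flatMap (fun j =>
        (PySem.List.pyRange 1 (T + 1 - i - j) 1).flatMap (fun k =>
          (PySem.List.pyRange 1 (T + 1 - i - j - k) 1).flatMap (fun l =>
            (PySem.List.pyRange 1 (T + 1 - i - j - k - l) 1).flatMap (fun m =>
              (PySem.List.pyRange 1 (T + 1 - i - j - k - l - m) 1).map (fun n => [i, j, k, l, m, n]))))))
  else
    pvProdRepeat (PySem.List.pyRange 1 (T + 1) 1) d.toNat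

-- ===== PORT B =====
def pvRec (remaining : Int) : Nat → List (List Int)
  | 0 => [[]]
  | depth + 1 =>
    (PySem.List.pyRange 1 remaining 1).flatMap (fun x =>
      (pvRec (remaining - x) depth).map (fun rest => x :: rest))

def candidateCombinations_alt (T : Int) (d : Int) : List (List Int) :=
  if 2 ≤ d ∧ d ≤ 6 then
    pvRec (T + 1) d.toNat
  else
    pvProdRepeat (PySem.List.pyRange 1 (T + 1) 1) d.toNat

-- ===== PRECONDITION & SPEC =====
-- Pre_ excludes d < 0, on which both Pythons raise ValueError (product with negative repeat).
def Pre_candidateCombinations (T : Int) (d : Int) : Prop := 0 ≤ d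
instance (T : Int) (d : Int) : Decidable (Pre_candidateCombinations T d) := by unfold Pre_candidateCombinations; infer_instance
def pvWitness_candidateCombinations : Int × Int := (4, 3)

def Spec_candidateCombinations (T : Int) (d : Int) (out : List (List Int)) : Prop := out = candidateCombinations_alt T d
instance (T : Int) (d : Int) (out : List (List Int)) : Decidable (Spec_candidateCombinations T d out) := by unfold Spec_candidateCombinations; infer_instance

-- ===== CLAIM (what is proved, stated in full; the proofs are below) =====
def Claim_equal_candidateCombinations : Prop := ∀ (T : Int) (d : Int), Dom_candidateCombinations T d → Pre_candidateCombinations T d → Spec_candidateCombinations T d (candidateCombinations T d)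

-- ===== LEMMAS AND PROOFS =====
theorem pvFlatMap_single {a b : Type} (l : List a) (f : a -> b) :
    l.flatMap (fun x => [f x]) = l.map f := by
  induction l with
  | nil => rfl
  | cons x xs ih => simp [List.flatMap_cons, ih]

-- ===== VERDICT (by name: the statement is the Claim_ definition above) =====
theorem candidateCombinations_spec : Claim_equal_candidateCombinations := by
  intro T d _ _
  unfold Spec_candidateCombinations candidateCombinations candidateCombinations_alt
  by_cases h2 : d = 2
  · subst h2; simp [pvRec, List.map_flatMap, pvFlatMap_single, Function.comp_def]
  by_cases h3 : d = 3
  · subst h3; simp [pvRec, List.map_flatMap, pvFlatMap_single, Function.comp_def]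
  by_cases h4 : d = 4
  · subst h4; simp [pvRec, List.map_flatMap, pvFlatMap_single, Function.comp_def]
  by_cases h5 : d = 5
  · subst h5; simp [pvRec, List.map_flatMap, pvFlatMap_single, Function.comp_def]
  by_cases h6 : d = 6
  · subst h6; simp [pvRec, List.map_flatMap, pvFlatMap_single, Function.comp_def]
  · have : ¬ (2 ≤ d ∧ d ≤ 6) := by omega
    simp [h2, h3, h4, h5, h6, this]
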